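-- pv_equiv track=rewrite | github.com/priyanshujhapj/AlgorithmicToolbox | sqr_sum_of_large_fib_num_partial.py | pisanoModulo
-- ===== SOURCE A (Python) =====
-- def pisanoModulo(n):
--     m = n+1
--     remainder = n%60
--
--     previous, current = 0, 1
--     if remainder==0:
--         return 0
--     elif remainder==1:
--         return 1
--     for i in range(remainder-1):
--         previous, current = current, (previous+current)
--
--     N = current%10
--
--     remainder = m%60
--     previous, current = 0, 1
--     if remainder==0:
--         return 0
--     elif remainder==1:
--         return 1
--     for i in range(remainder-1):
--         previous, current = current, (previous+current)
--
--     M = current%10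
--
--     return (N*M)%10
-- ===== SOURCE B (Python) =====
-- def pisanoModulo(n):
--     T = [0, 1]
--     for _ in range(58):
--         T.append((T[-2] + T[-1]) % 10)
--     return T[n % 60] * T[(n + 1) % 60] % 10
-- ===== Notes on version B (the rewrite author's own statement) =====
-- stated objective: simpler
-- what changed: Replaced A's two separate growing Fibonacci accumulation loops (with early-return guards) by a single Pisano-period last-digit table built once, followed by two constant-time lookups.
import Mathlib
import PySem

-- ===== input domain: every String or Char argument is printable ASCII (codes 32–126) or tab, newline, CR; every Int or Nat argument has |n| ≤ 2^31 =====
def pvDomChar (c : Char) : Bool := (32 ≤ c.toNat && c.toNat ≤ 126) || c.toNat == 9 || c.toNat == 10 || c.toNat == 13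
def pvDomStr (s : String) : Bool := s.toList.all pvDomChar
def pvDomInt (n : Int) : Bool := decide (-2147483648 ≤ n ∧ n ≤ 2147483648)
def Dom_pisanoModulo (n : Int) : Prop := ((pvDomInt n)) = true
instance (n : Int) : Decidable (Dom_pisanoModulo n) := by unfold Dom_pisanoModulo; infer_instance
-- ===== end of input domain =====

-- B replaces A's two growing Fibonacci accumulation loops by one 60-entry Pisano last-digit
-- table built once, followed by two constant-time lookups (objective: simpler).


-- ===== PORT A =====
def pisanoModulo (n : Int) : Int :=
  let m := n + 1
  let remainder := PySem.Int.mod n 60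
  if remainder = 0 then 0
  else if remainder = 1 then 1
  else
    let pc := (PySem.List.pyRange 0 (remainder - 1) 1).foldl
      (fun (pc : Int × Int) _ => (pc.2, pc.1 + pc.2)) (0, 1)
    let N := PySem.Int.mod pc.2 10
    let remainder2 := PySem.Int.mod m 60
    if remainder2 = 0 then 0
    else if remainder2 = 1 then 1
    else
      let pc2 := (PySem.List.pyRange 0 (remainder2 - 1) 1).foldl
        (fun (pc : Int × Int) _ => (pc.2, pc.1 + pc.2)) (0, 1)
      let M := PySem.Int.mod pc2.2 10
      PySem.Int.mod (N * M) 10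

-- ===== PORT B =====
def pisanoModulo_alt (n : Int) : Int :=
  let T := (List.range 58).foldl
    (fun (t : List Int) _ =>
      t ++ [PySem.Int.mod (((PySem.List.pyGet? t (-2)).getD 0) + ((PySem.List.pyGet? t (-1)).getD 0)) 10])
    [0, 1]
  PySem.Int.mod
    (((PySem.List.pyGet? T (PySem.Int.mod n 60)).getD 0) *
     ((PySem.List.pyGet? T (PySem.Int.mod (n + 1) 60)).getD 0)) 10

-- ===== PRECONDITION & SPEC =====
def Spec_pisanoModulo (n : Int) (out : Int) : Prop := out = pisanoModulo_alt n
instance (n : Int) (out : Int) : Decidable (Spec_pisanoModulo n out) := by unfold Spec_pisanoModulo; infer_instance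

-- ===== CLAIM (what is proved, stated in full; the proofs are below) =====
def Claim_equal_pisanoModulo : Prop := ∀ (n : Int), Dom_pisanoModulo n → Spec_pisanoModulo n (pisanoModulo n)

-- ===== LEMMAS AND PROOFS =====

lemma pv_mod60_idem (n : Int) : PySem.Int.mod (PySem.Int.mod n 60) 60 = PySem.Int.mod n 60 := by
  rw [PySem.Int.mod_eq_emod_of_pos (by norm_num), PySem.Int.mod_eq_emod_of_pos (by norm_num)]
  exact Int.emod_emod_of_dvd n dvd_rfl

lemma pv_mod60_succ (n : Int) :
    PySem.Int.mod (PySem.Int.mod n 60 + 1) 60 = PySem.Int.mod (n + 1) 60 := by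
  rw [PySem.Int.mod_eq_emod_of_pos (by norm_num), PySem.Int.mod_eq_emod_of_pos (by norm_num),
    PySem.Int.mod_eq_emod_of_pos (by norm_num)]
  conv_rhs => rw [show n + 1 = n % 60 + 1 + 60 * (n / 60) by omega]
  omega

lemma pv_A_reduce (n : Int) : pisanoModulo n = pisanoModulo (PySem.Int.mod n 60) := by
  conv_rhs => rw [pisanoModulo]
  simp only [pv_mod60_idem, pv_mod60_succ]
  rfl

lemma pv_B_reduce (n : Int) : pisanoModulo_alt n = pisanoModulo_alt (PySem.Int.mod n 60) := by
  conv_rhs => rw [pisanoModulo_alt]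
  simp only [pv_mod60_idem, pv_mod60_succ]
  rfl

set_option maxRecDepth 10000 in
lemma pv_key : ∀ k ∈ Finset.range 60, pisanoModulo (k : Int) = pisanoModulo_alt (k : Int) := by
  decide

-- ===== VERDICT (by name: the statement is the Claim_ definition above) =====
theorem pisanoModulo_spec : Claim_equal_pisanoModulo := by
  intro n _
  unfold Spec_pisanoModulo
  rw [pv_A_reduce, pv_B_reduce]
  have h60 : (0:Int) < 60 := by norm_num
  have hr : PySem.Int.mod n 60 = ((n % 60).toNat : Int) := by
    rw [PySem.Int.mod_eq_emod_of_pos h60]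
    have := Int.emod_nonneg n (by norm_num : (60:Int) ≠ 0)
    omega
  rw [hr]
  exact pv_key (n % 60).toNat (Finset.mem_range.mpr (by
    have := Int.emod_lt_of_pos n h60
    have := Int.emod_nonneg n (by norm_num : (60:Int) ≠ 0)
    omega))
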